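-- pv_equiv track=rewrite | github.com/akhatkulov/algorithms | robocontest/0656.py | calc
-- ===== SOURCE A (Python) =====
-- from collections import deque
--
-- def calc(l:list) -> int:
--   x = deque(l)
--   t = True
--   while len(x)>1:
--     if t:
--       x.pop()
--     else:
--       x.popleft()
--
--     t = not t
--
--   return x[0]
-- ===== SOURCE B (Python) =====
-- def calc(l: list) -> int:
--     # Alternating removal (right first) always leaves the element at index (len-1)//2.
--     return l[(len(l) - 1) // 2]
-- ===== Notes on version B (the rewrite author's own statement) =====
-- stated objective: faster
-- what changed: Replaces the O(n) alternating deque pop/popleft loop with the closed-form index l[(len(l)-1)//2].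
import Mathlib
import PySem

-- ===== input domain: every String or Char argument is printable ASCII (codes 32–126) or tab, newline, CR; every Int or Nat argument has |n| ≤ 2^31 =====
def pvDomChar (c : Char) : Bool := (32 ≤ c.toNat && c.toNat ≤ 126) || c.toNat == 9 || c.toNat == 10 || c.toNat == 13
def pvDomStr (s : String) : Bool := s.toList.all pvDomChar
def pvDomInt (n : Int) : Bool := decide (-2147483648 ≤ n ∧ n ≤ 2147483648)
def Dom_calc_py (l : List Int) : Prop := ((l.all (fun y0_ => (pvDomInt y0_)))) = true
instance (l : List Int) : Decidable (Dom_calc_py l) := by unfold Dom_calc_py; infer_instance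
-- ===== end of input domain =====

-- B replaces A's O(n) alternating deque pop/popleft loop with the closed-form index l[(len(l)-1)//2] (faster).
-- Pre_ excludes the empty list, on which A raises IndexError (x[0] on an empty deque).


-- ===== PORT A =====
-- the while loop: state is the deque x and the flag t; pop = dropLast, popleft = tail
def calcLoop (x : List Int) (t : Bool) : List Int :=
  if x.length > 1 then
    calcLoop (if t then x.dropLast else x.tail) (!t)
  else x
termination_by x.length
decreasing_by
  cases t <;> simp_all <;> omega

def calc_py (l : List Int) : Int :=
  -- x[0] raises on empty; Pre_ excludes l = [], so getD 0 is never the default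
  (PySem.List.pyGet? (calcLoop l true) 0).getD 0

-- ===== PORT B =====
def calc_py_alt (l : List Int) : Int :=
  -- l[(len(l)-1)//2]; index is in range whenever l ≠ [] (Pre_)
  (PySem.List.pyGet? l (PySem.Int.floordiv ((l.length : Int) - 1) 2)).getD 0

-- ===== PRECONDITION & SPEC =====
-- A raises IndexError on the empty list (x[0]); B would also raise there.
def Pre_calc_py (l : List Int) : Prop := l ≠ []
instance (l : List Int) : Decidable (Pre_calc_py l) := by unfold Pre_calc_py; infer_instance
def pvWitness_calc_py : List Int := [3, 1, 4]

def Spec_calc_py (l : List Int) (out : Int) : Prop := out = calc_py_alt l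
instance (l : List Int) (out : Int) : Decidable (Spec_calc_py l out) := by unfold Spec_calc_py; infer_instance

-- ===== CLAIM (what is proved, stated in full; the proofs are below) =====
def Claim_equal_calc_py : Prop := ∀ (l : List Int), Dom_calc_py l → Pre_calc_py l → Spec_calc_py l (calc_py l)

-- ===== LEMMAS AND PROOFS =====

theorem getD_dropLast (x : List Int) (i : Nat) (h : i < x.length - 1) :
    x.dropLast.getD i 0 = x.getD i 0 := by
  rw [List.getD_eq_getElem _ _ (by simp; omega), List.getD_eq_getElem _ _ (by omega)]
  simp [List.getElem_dropLast]

theorem getD_tail (x : List Int) (i : Nat) (h : i + 1 < x.length) :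
    x.tail.getD i 0 = x.getD (i + 1) 0 := by
  rw [List.getD_eq_getElem _ _ (by simp; omega), List.getD_eq_getElem _ _ h]
  simp [List.getElem_tail]

-- the loop leaves exactly one element: x[(m-1)/2] when t, x[m/2] when ¬t
theorem calcLoop_eq (x : List Int) (t : Bool) (h : x ≠ []) :
    calcLoop x t = [x.getD (if t then (x.length - 1) / 2 else x.length / 2) 0] := by
  induction x, t using calcLoop.induct with
  | case1 x t h1 ih =>
    rw [calcLoop, if_pos h1]
    have hlen : 2 ≤ x.length := h1
    cases t with
    | true =>
      simp only [Bool.not_true, Bool.false_eq_true, reduceIte, if_false, dite_true] at ih ⊢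
      have hne : x.dropLast ≠ [] := by
        intro hc; have := congrArg List.length hc; simp at this; omega
      rw [ih hne]
      simp only [List.length_dropLast]
      rw [getD_dropLast x _ (by omega)]
    | false =>
      simp only [Bool.not_false, Bool.false_eq_true, reduceIte, if_false, dite_false] at ih ⊢
      have hne : x.tail ≠ [] := by
        intro hc; have := congrArg List.length hc; simp at this; omega
      rw [ih hne]
      simp only [List.length_tail]
      rw [getD_tail x _ (by omega)]
      congr 2
      omega
  | case2 x t h1 =>
    rw [calcLoop, if_neg h1]
    match x, h with
    | [a], _ => cases t <;> simp
    | a :: b :: r, _ => simp at h1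

theorem calc_py_spec : Claim_equal_calc_py := by
  intro l _ hpre
  unfold Spec_calc_py calc_py calc_py_alt
  rw [calcLoop_eq l true hpre]
  simp only [if_true, PySem.List.pyGet?_zero_cons, Option.getD_some]
  have h1 : 1 ≤ l.length := by
    cases l with
    | nil => exact absurd rfl hpre
    | cons a r => simp
  have hc : ((l.length : Int) - 1) = ((l.length - 1 : Nat) : Int) := by omega
  rw [hc]
  rw [show ((2 : Int)) = ((2 : Nat) : Int) from rfl, PySem.Int.floordiv_natCast]
  rw [PySem.List.pyGet?_natCast]
  rw [List.getD_eq_getElem?_getD]
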